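-- pv_equiv track=rewrite | github.com/Aseamann/TRain | 05_Analysis/Current_Programs/TerpEnergy_Fran.py | get_peptide_inter
-- ===== SOURCE A (Python) =====
-- def get_peptide_inter(chains, interactions):
--     peptide = []
--     aa_inter = {}
--     for AA_Peptide in chains["C"]:
--         peptide.append(AA_Peptide)
--     for each in peptide:
--         if each[0] in aa_inter.keys():
--             aa_inter[each[0]].append(interactions[each[0]])
--         else:
--             aa_inter[each[0]] = [interactions[each[0]]]
--     return aa_inter
-- ===== SOURCE B (Python) =====
-- def get_peptide_inter(chains, interactions):
--     counts = {}
--     for p in chains["C"]: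
--         counts[p[0]] = counts.get(p[0], 0) + 1
--     return {k: [interactions[k]] * n for k, n in counts.items()}
-- ===== Notes on version B (the rewrite author's own statement) =====
-- stated objective: simpler
-- what changed: Replaces A's copy-then-append grouping loop (conditional list append per element) with a single tally of first components followed by one dict comprehension that materializes each group as [interactions[k]] * count, exploiting that all members of a group carry the identical value.
-- outside the precondition, e.g. on get_peptide_inter({'A': []}, {}): A raises KeyError, B raises KeyError; on get_peptide_inter({'C': [('x', 1)]}, {'y': 2}): A raises KeyError, B raises KeyError
import Mathlib
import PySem

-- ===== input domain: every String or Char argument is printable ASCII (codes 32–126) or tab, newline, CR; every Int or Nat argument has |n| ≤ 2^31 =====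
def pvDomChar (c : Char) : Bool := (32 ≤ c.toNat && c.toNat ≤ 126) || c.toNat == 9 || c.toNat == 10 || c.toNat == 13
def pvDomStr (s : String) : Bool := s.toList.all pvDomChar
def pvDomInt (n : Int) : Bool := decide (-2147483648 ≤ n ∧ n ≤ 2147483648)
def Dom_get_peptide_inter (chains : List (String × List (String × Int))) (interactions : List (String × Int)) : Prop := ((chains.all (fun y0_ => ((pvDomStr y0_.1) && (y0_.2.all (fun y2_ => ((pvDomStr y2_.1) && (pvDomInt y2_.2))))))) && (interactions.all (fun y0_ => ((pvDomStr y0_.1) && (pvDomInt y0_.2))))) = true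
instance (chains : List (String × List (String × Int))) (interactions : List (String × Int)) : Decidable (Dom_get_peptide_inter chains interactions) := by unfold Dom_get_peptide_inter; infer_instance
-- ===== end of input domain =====

-- B replaces A's incremental append-per-element grouping loop by a tally of first components
-- followed by one List.replicate per distinct key (simpler decomposition; same return value on Pre_).


-- ===== PORT A =====
-- Port of A: copy chains["C"], then append interactions[p.1] into a per-key list dict.
-- (Python raises KeyError when "C" is missing or an interaction key is missing; Pre_ excludes those.)
def get_peptide_inter (chains : List (String × List (String × Int))) (interactions : List (String × Int)) : List (String × List Int) :=
  let peptide := (PySem.Dict.mk chains).getD "C" []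
  let aa_inter := peptide.foldl (fun d each =>
      if d.contains each.1 then
        d.modify each.1 [] (· ++ [(PySem.Dict.mk interactions).getD each.1 0])
      else
        d.insert each.1 [(PySem.Dict.mk interactions).getD each.1 0])
    PySem.Dict.empty
  aa_inter.items

-- ===== PORT B =====
-- Port of B: tally first components, then materialize each group with List.replicate.
def get_peptide_inter_alt (chains : List (String × List (String × Int))) (interactions : List (String × Int)) : List (String × List Int) :=
  let counts := ((PySem.Dict.mk chains).getD "C" []).foldl
      (fun d p => d.insert p.1 (d.getD p.1 0 + 1)) (PySem.Dict.empty : PySem.Dict String Int)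
  counts.items.map (fun kn => (kn.1, List.replicate kn.2.toNat ((PySem.Dict.mk interactions).getD kn.1 0)))

-- ===== PRECONDITION & SPEC =====
-- Pre_ excludes exactly the inputs on which Python A raises KeyError: a missing "C" chain,
-- or a peptide whose first component is not a key of interactions.
def Pre_get_peptide_inter (chains : List (String × List (String × Int))) (interactions : List (String × Int)) : Prop :=
  (PySem.Dict.mk chains).contains "C" = true ∧
  ∀ p ∈ (PySem.Dict.mk chains).getD "C" [], (PySem.Dict.mk interactions).contains p.1 = true
instance (chains : List (String × List (String × Int))) (interactions : List (String × Int)) : Decidable (Pre_get_peptide_inter chains interactions) := by unfold Pre_get_peptide_inter; infer_instance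
def pvWitness_get_peptide_inter : (List (String × List (String × Int))) × (List (String × Int)) :=
  ([("C", [("x", 1), ("y", 2), ("x", 3)])], [("x", 5), ("y", 7)])

def Spec_get_peptide_inter (chains : List (String × List (String × Int))) (interactions : List (String × Int)) (out : List (String × List Int)) : Prop := out = get_peptide_inter_alt chains interactions
instance (chains : List (String × List (String × Int))) (interactions : List (String × Int)) (out : List (String × List Int)) : Decidable (Spec_get_peptide_inter chains interactions out) := by unfold Spec_get_peptide_inter; infer_instance

-- ===== CLAIM (what is proved, stated in full; the proofs are below) =====
def Claim_equal_get_peptide_inter : Prop := ∀ (chains : List (String × List (String × Int))) (interactions : List (String × Int)), Dom_get_peptide_inter chains interactions → Pre_get_peptide_inter chains interactions → Spec_get_peptide_inter chains interactions (get_peptide_inter chains interactions)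

-- ===== LEMMAS AND PROOFS =====

lemma dict_modify_not_contains {κ ν : Type} [BEq κ] [LawfulBEq κ] (d : PySem.Dict κ ν) (k : κ) (d0 : ν) (f : ν → ν)
    (h : d.contains k = false) : d.modify k d0 f = d.insert k (f d0) := by
  simp [PySem.Dict.modify, pysem, h]

lemma filt_rep {α : Type} (v : String → α) (c : String) (ks : List String) :
  ((ks.map (fun x => (x, v x))).filter (fun p => p.1 == c)).map (·.2)
    = List.replicate (ks.count c) (v c) := by
  induction ks with
  | nil => simp
  | cons x t ih =>
    by_cases h : x = c
    · subst h; simp [List.replicate_succ, ih]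
    · simp [h, ih]

lemma items_eq_keys_map {κ ν : Type} [BEq κ] [LawfulBEq κ] (d : PySem.Dict κ ν) (d0 : ν)
    (h : d.keys.Nodup) : d.items = d.keys.map (fun k => (k, d.getD k d0)) := by
  have hk : d.keys = d.items.map (·.1) := rfl
  rw [hk, List.map_map]
  conv_lhs => rw [← List.map_id d.items]
  apply List.map_congr_left
  intro p hp
  simp [PySem.Dict.getD_of_mem_items (d := d) (d0 := d0) (by simpa using hp) (by rw [hk] at h; exact h)]

lemma core (pep : List (String × Int)) (vI : String → Int) :
  (pep.foldl (fun d each => if d.contains each.1 then d.modify each.1 [] (· ++ [vI each.1]) else d.insert each.1 [vI each.1]) (PySem.Dict.empty : PySem.Dict String (List Int))).items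
  = (pep.foldl (fun d p => d.insert p.1 (d.getD p.1 0 + 1)) (PySem.Dict.empty : PySem.Dict String Int)).items.map
      (fun kn => (kn.1, List.replicate kn.2.toNat (vI kn.1))) := by
  have hstep : (fun (d : PySem.Dict String (List Int)) (each : String × Int) =>
      if d.contains each.1 then d.modify each.1 [] (· ++ [vI each.1]) else d.insert each.1 [vI each.1])
      = fun d each => d.modify each.1 [] (· ++ [vI each.1]) := by
    funext d each
    by_cases h : d.contains each.1
    · simp [h]
    · simp [h, dict_modify_not_contains d each.1 [] _ (by simpa using h)]
  rw [hstep]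
  rw [show pep.foldl (fun d each => d.modify each.1 [] (· ++ [vI each.1])) (PySem.Dict.empty : PySem.Dict String (List Int))
      = (pep.map (·.1)).foldl (fun d x => d.modify x [] (· ++ [vI x])) PySem.Dict.empty from
      (List.foldl_map (f := fun p => p.1) (g := fun d x => d.modify x [] (· ++ [vI x])) (l := pep) (init := PySem.Dict.empty)).symm]
  rw [show pep.foldl (fun d p => d.insert p.1 (d.getD p.1 0 + 1)) (PySem.Dict.empty : PySem.Dict String Int)
      = (pep.map (·.1)).foldl (fun d x => d.insert x (d.getD x 0 + 1)) (PySem.Dict.empty : PySem.Dict String Int) from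
      (List.foldl_map (f := fun p => p.1) (g := fun (d : PySem.Dict String Int) x => d.insert x (d.getD x 0 + 1)) (l := pep) (init := PySem.Dict.empty)).symm]
  generalize pep.map (·.1) = ks
  rw [PySem.Dict.foldl_insert_getD_add_one_eq_counter, PySem.Dict.items_counter]
  have hnodup : ((ks.foldl (fun d x => d.modify x [] (· ++ [vI x])) (PySem.Dict.empty : PySem.Dict String (List Int)))).keys.Nodup :=
    PySem.Dict.nodup_keys_foldl_modify_key ks (fun x => x) [] (fun _ x => (· ++ [vI x])) _ (by simp [pysem])
  rw [items_eq_keys_map _ [] hnodup]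
  have hkeys : ((ks.foldl (fun d x => d.modify x [] (· ++ [vI x])) (PySem.Dict.empty : PySem.Dict String (List Int)))).keys = PySem.Set.ofList ks := by
    rw [PySem.Dict.keys_foldl_modify]
    rfl
  rw [hkeys, List.map_map]
  apply List.map_congr_left
  intro k hk
  have hgetD : ((ks.foldl (fun d x => d.modify x [] (· ++ [vI x])) (PySem.Dict.empty : PySem.Dict String (List Int)))).getD k []
      = List.replicate (ks.count k) (vI k) := by
    rw [show ks.foldl (fun d x => d.modify x [] (· ++ [vI x])) (PySem.Dict.empty : PySem.Dict String (List Int))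
        = (ks.map (fun x => (x, vI x))).foldl (fun d p => d.modify p.1 [] (· ++ [p.2])) PySem.Dict.empty from
        (List.foldl_map (f := fun x => (x, vI x)) (g := fun d p => d.modify p.1 [] (· ++ [p.2])) (l := ks) (init := PySem.Dict.empty)).symm]
    rw [PySem.Dict.getD_foldl_modify_append]
    simp [filt_rep]
  simp [hgetD]


-- ===== VERDICT (by name: the statement is the Claim_ definition above) =====
theorem get_peptide_inter_spec : Claim_equal_get_peptide_inter := by
  intro chains interactions _ _
  unfold Spec_get_peptide_inter get_peptide_inter get_peptide_inter_alt
  exact core ((PySem.Dict.mk chains).getD "C" []) (fun k => (PySem.Dict.mk interactions).getD k 0)
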